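-- pv_equiv track=rewrite | github.com/KimJonghoSNU/Abstraction_gap | src/run_round6_beampack.py | _ordered_doc_keys
-- ===== SOURCE A (Python) =====
-- from typing import Any, Dict, List, Optional, Sequence, Set, Tuple
--
-- CATEGORY_ORDER = ["Theory", "Entity", "Example", "Other"]
--
-- def _ordered_doc_keys(docs: Dict[str, str]) -> List[str]:
--     known = [key for key in CATEGORY_ORDER if str((docs or {}).get(key, "")).strip()]
--     extra: List[str] = []
--     for key, val in (docs or {}).items():
--         key_s = str(key or "").strip()
--         if not key_s or key_s in CATEGORY_ORDER:
--             continue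
--         if str(val or "").strip():
--             extra.append(key_s)
--     return known + extra
-- ===== SOURCE B (Python) =====
-- from typing import Dict, List
--
-- CATEGORY_ORDER = ["Theory", "Entity", "Example", "Other"]
--
-- def _ordered_doc_keys(docs: Dict[str, str]) -> List[str]:
--     # Decorate-and-bucket: tag every kept key with a numeric rank (its category
--     # index, or n for an extra key), then emit by ascending rank.
--     rank = {k: i for i, k in enumerate(CATEGORY_ORDER)}
--     n = len(CATEGORY_ORDER)
--     ranked: List[tuple] = []
--     for key, val in (docs or {}).items():
--         if not str(val or "").strip():
--             continue
--         i = rank.get(key)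
--         if i is None:
--             key_s = str(key or "").strip()
--             if key_s and key_s not in rank:
--                 ranked.append((n, key_s))
--         else:
--             ranked.append((i, key))
--     return [k for r in range(n + 1) for (i, k) in ranked if i == r]
-- ===== Notes on version B (the rewrite author's own statement) =====
-- stated objective: alternative
-- what changed: B replaces A's per-category dict lookups plus separate extras loop by a decorate-and-bucket scheme: one pass tags every kept key with a numeric rank (its category index from a rank dict, or n for an extra key), then the result is emitted bucket-by-bucket in ascending rank.
import Mathlib
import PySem

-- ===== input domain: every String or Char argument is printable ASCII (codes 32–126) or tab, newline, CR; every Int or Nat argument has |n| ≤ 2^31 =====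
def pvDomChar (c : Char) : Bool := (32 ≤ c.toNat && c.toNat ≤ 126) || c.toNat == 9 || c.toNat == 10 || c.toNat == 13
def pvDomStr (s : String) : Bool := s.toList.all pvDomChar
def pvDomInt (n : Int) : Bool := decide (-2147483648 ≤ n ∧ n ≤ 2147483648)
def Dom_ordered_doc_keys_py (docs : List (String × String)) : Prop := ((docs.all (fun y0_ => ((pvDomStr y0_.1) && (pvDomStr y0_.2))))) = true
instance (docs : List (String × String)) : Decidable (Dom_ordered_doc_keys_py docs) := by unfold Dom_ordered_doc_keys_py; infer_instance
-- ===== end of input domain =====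

-- B tags every kept key with a numeric rank (category index, or 4 for extras) in one
-- decorate pass, then emits the keys bucket-by-bucket in ascending rank, instead of A's
-- per-category dict lookups plus a separate extras loop (alternative decomposition).


def CATEGORY_ORDER : List String := ["Theory", "Entity", "Example", "Other"]

-- ===== PORT A =====
-- the dict argument is modelled by building the Dict from the association list (dict construction)
def ordered_doc_keys_py (docs : List (String × String)) : List String :=
  let d := PySem.Dict.ofList docs
  let known := CATEGORY_ORDER.filter (fun key => (PySem.Str.strip (d.getD key "")) != "")
  let extra := d.items.foldl (fun (extra : List String) kv =>
      let key_s := PySem.Str.strip kv.1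
      if key_s == "" || CATEGORY_ORDER.contains key_s then extra
      else if (PySem.Str.strip kv.2) != "" then extra ++ [key_s]
      else extra) []
  known ++ extra

-- ===== PORT B =====
-- rank = {k: i for i, k in enumerate(CATEGORY_ORDER)}; one decorate pass over the dict
-- builds the (rank, key) list; emission walks the ranks 0..n and flushes each bucket.
def ordered_doc_keys_py_alt (docs : List (String × String)) : List String :=
  let rank : PySem.Dict String Int :=
    PySem.Dict.ofList ((PySem.List.enumerate CATEGORY_ORDER 0).map (fun p => (p.2, p.1)))
  let n : Int := (CATEGORY_ORDER.length : Int)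
  let d := PySem.Dict.ofList docs
  let ranked := d.items.foldl (fun (acc : List (Int × String)) kv =>
      if PySem.Str.strip kv.2 == "" then acc
      else match rank.get? kv.1 with
        | none =>
            let key_s := PySem.Str.strip kv.1
            if key_s != "" && !(rank.contains key_s) then acc ++ [(n, key_s)] else acc
        | some i => acc ++ [(i, kv.1)]) []
  (PySem.List.pyRange 0 (n + 1) 1).foldl
    (fun out r => out ++ (ranked.filter (fun p => p.1 == r)).map Prod.snd) []

-- ===== PRECONDITION & SPEC =====
def Spec_ordered_doc_keys_py (docs : List (String × String)) (out : List String) : Prop := out = ordered_doc_keys_py_alt docs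
instance (docs : List (String × String)) (out : List String) : Decidable (Spec_ordered_doc_keys_py docs out) := by unfold Spec_ordered_doc_keys_py; infer_instance

-- ===== CLAIM (what is proved, stated in full; the proofs are below) =====
def Claim_equal_ordered_doc_keys_py : Prop := ∀ (docs : List (String × String)), Dom_ordered_doc_keys_py docs → Spec_ordered_doc_keys_py docs (ordered_doc_keys_py docs)

-- ===== LEMMAS AND PROOFS =====

-- the literal value of B's rank dict
def pvRank : PySem.Dict String Int :=
  PySem.Dict.mk [("Theory", 0), ("Entity", 1), ("Example", 2), ("Other", 3)]

-- per-entry contribution of B's decorate pass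
def pvTag (kv : String × String) : List (Int × String) :=
  if PySem.Str.strip kv.2 == "" then []
  else match pvRank.get? kv.1 with
    | none =>
        if PySem.Str.strip kv.1 != "" && !(pvRank.contains (PySem.Str.strip kv.1)) then
          [((4 : Int), PySem.Str.strip kv.1)]
        else []
    | some i => [(i, kv.1)]

-- per-entry contribution of A's extras loop
def pvExtraTag (kv : String × String) : List String :=
  if PySem.Str.strip kv.1 == "" || CATEGORY_ORDER.contains (PySem.Str.strip kv.1) then []
  else if PySem.Str.strip kv.2 != "" then [PySem.Str.strip kv.1]
  else []

-- per-entry contribution of category c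
def pvCatTag (c : String) (kv : String × String) : List String :=
  if kv.1 == c && (PySem.Str.strip kv.2 != "") then [c] else []

lemma pvRank_eq :
    PySem.Dict.ofList ((PySem.List.enumerate CATEGORY_ORDER 0).map (fun p => (p.2, p.1))) = pvRank := by
  decide

lemma pvRank_get? (x : String) :
    pvRank.get? x =
      if "Theory" == x then some 0
      else if "Entity" == x then some 1
      else if "Example" == x then some 2
      else if "Other" == x then some 3
      else none := by
  by_cases h0 : ("Theory" : String) = x
  · subst h0; decide
  · by_cases h1 : ("Entity" : String) = x
    · subst h1; decide
    · by_cases h2 : ("Example" : String) = x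
      · subst h2; decide
      · by_cases h3 : ("Other" : String) = x
        · subst h3; decide
        · simp [pvRank, PySem.Dict.get?, List.find?_cons, beq_iff_eq, h0, h1, h2, h3]

lemma pvRank_contains (x : String) : pvRank.contains x = CATEGORY_ORDER.contains x := by
  simp only [pvRank, PySem.Dict.contains_mk, List.any_cons, List.any_nil, Bool.or_false,
    CATEGORY_ORDER, List.contains_cons, List.contains_nil]
  by_cases h0 : x = "Theory" <;> by_cases h1 : x = "Entity" <;>
    by_cases h2 : x = "Example" <;> by_cases h3 : x = "Other" <;>
      simp [BEq.comm, h0, h1, h2, h3]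

lemma pvMk_items {κ ν : Type} (d : PySem.Dict κ ν) : PySem.Dict.mk d.items = d := by
  cases d; rfl

lemma pvTag_filter4 (kv : String × String) :
    ((pvTag kv).filter (fun p => p.1 == (4 : Int))).map Prod.snd = pvExtraTag kv := by
  unfold pvTag pvExtraTag
  rw [pvRank_get? kv.1, pvRank_contains]
  by_cases hv : PySem.Str.strip kv.2 = ""
  · simp [hv]
  · by_cases h0 : kv.1 = "Theory"
    · simp [h0, hv, CATEGORY_ORDER, (by decide : PySem.Str.strip "Theory" = "Theory")]
    · by_cases h1 : kv.1 = "Entity"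
      · simp [h1, hv, CATEGORY_ORDER, (by decide : PySem.Str.strip "Entity" = "Entity")]
      · by_cases h2 : kv.1 = "Example"
        · simp [h2, hv, CATEGORY_ORDER, (by decide : PySem.Str.strip "Example" = "Example")]
        · by_cases h3 : kv.1 = "Other"
          · simp [h3, hv, CATEGORY_ORDER, (by decide : PySem.Str.strip "Other" = "Other")]
          · have e0 : ("Theory" == kv.1) = false := by simp [beq_iff_eq]; exact fun h => h0 h.symm
            have e1 : ("Entity" == kv.1) = false := by simp [beq_iff_eq]; exact fun h => h1 h.symm
            have e2 : ("Example" == kv.1) = false := by simp [beq_iff_eq]; exact fun h => h2 h.symm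
            have e3 : ("Other" == kv.1) = false := by simp [beq_iff_eq]; exact fun h => h3 h.symm
            by_cases hs : PySem.Str.strip kv.1 = ""
            · simp [e0, e1, e2, e3, hv, hs]
            · by_cases hc : PySem.Str.strip kv.1 ∈ CATEGORY_ORDER
              · simp [e0, e1, e2, e3, hv, hs, hc]
              · simp [e0, e1, e2, e3, hv, hs, hc]

lemma pvTag_filter_cat (r : Int) (c : String)
    (h : (r, c) ∈ ([(0, "Theory"), (1, "Entity"), (2, "Example"), (3, "Other")] : List (Int × String)))
    (kv : String × String) :
    ((pvTag kv).filter (fun p => p.1 == r)).map Prod.snd = pvCatTag c kv := by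
  unfold pvTag pvCatTag
  rw [pvRank_get? kv.1]
  by_cases hv : PySem.Str.strip kv.2 = ""
  · simp only [List.mem_cons, List.not_mem_nil, or_false, Prod.mk.injEq] at h
    rcases h with ⟨rfl, rfl⟩ | ⟨rfl, rfl⟩ | ⟨rfl, rfl⟩ | ⟨rfl, rfl⟩ <;> simp [hv]
  · by_cases h0 : kv.1 = "Theory"
    · simp only [List.mem_cons, List.not_mem_nil, or_false, Prod.mk.injEq] at h
      rcases h with ⟨rfl, rfl⟩ | ⟨rfl, rfl⟩ | ⟨rfl, rfl⟩ | ⟨rfl, rfl⟩ <;> simp [h0, hv]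
    · by_cases h1 : kv.1 = "Entity"
      · simp only [List.mem_cons, List.not_mem_nil, or_false, Prod.mk.injEq] at h
        rcases h with ⟨rfl, rfl⟩ | ⟨rfl, rfl⟩ | ⟨rfl, rfl⟩ | ⟨rfl, rfl⟩ <;> simp [h1, hv]
      · by_cases h2 : kv.1 = "Example"
        · simp only [List.mem_cons, List.not_mem_nil, or_false, Prod.mk.injEq] at h
          rcases h with ⟨rfl, rfl⟩ | ⟨rfl, rfl⟩ | ⟨rfl, rfl⟩ | ⟨rfl, rfl⟩ <;> simp [h2, hv]
        · by_cases h3 : kv.1 = "Other"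
          · simp only [List.mem_cons, List.not_mem_nil, or_false, Prod.mk.injEq] at h
            rcases h with ⟨rfl, rfl⟩ | ⟨rfl, rfl⟩ | ⟨rfl, rfl⟩ | ⟨rfl, rfl⟩ <;> simp [h3, hv]
          · have e0 : ("Theory" == kv.1) = false := by simp [beq_iff_eq]; exact fun h => h0 h.symm
            have e1 : ("Entity" == kv.1) = false := by simp [beq_iff_eq]; exact fun h => h1 h.symm
            have e2 : ("Example" == kv.1) = false := by simp [beq_iff_eq]; exact fun h => h2 h.symm
            have e3 : ("Other" == kv.1) = false := by simp [beq_iff_eq]; exact fun h => h3 h.symm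
            have f0 : (kv.1 == "Theory") = false := by simp [beq_iff_eq]; exact h0
            have f1 : (kv.1 == "Entity") = false := by simp [beq_iff_eq]; exact h1
            have f2 : (kv.1 == "Example") = false := by simp [beq_iff_eq]; exact h2
            have f3 : (kv.1 == "Other") = false := by simp [beq_iff_eq]; exact h3
            simp only [List.mem_cons, List.not_mem_nil, or_false, Prod.mk.injEq] at h
            rcases h with ⟨rfl, rfl⟩ | ⟨rfl, rfl⟩ | ⟨rfl, rfl⟩ | ⟨rfl, rfl⟩ <;>
              · by_cases hs : PySem.Str.strip kv.1 = "" <;>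
                  by_cases hc : PySem.Str.strip kv.1 ∈ CATEGORY_ORDER <;>
                    simp [e0, e1, e2, e3, f0, f1, f2, f3, hv, hs, hc, pvRank_contains]

lemma pvTag_filter0 (kv : String × String) :
    ((pvTag kv).filter (fun p => p.1 == (0 : Int))).map Prod.snd = pvCatTag "Theory" kv :=
  pvTag_filter_cat 0 "Theory" (by decide) kv
lemma pvTag_filter1 (kv : String × String) :
    ((pvTag kv).filter (fun p => p.1 == (1 : Int))).map Prod.snd = pvCatTag "Entity" kv :=
  pvTag_filter_cat 1 "Entity" (by decide) kv
lemma pvTag_filter2 (kv : String × String) :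
    ((pvTag kv).filter (fun p => p.1 == (2 : Int))).map Prod.snd = pvCatTag "Example" kv :=
  pvTag_filter_cat 2 "Example" (by decide) kv
lemma pvTag_filter3 (kv : String × String) :
    ((pvTag kv).filter (fun p => p.1 == (3 : Int))).map Prod.snd = pvCatTag "Other" kv :=
  pvTag_filter_cat 3 "Other" (by decide) kv

lemma pvFlatMap_catTag (L : List (String × String)) (hnd : (L.map Prod.fst).Nodup) (c : String) :
    L.flatMap (pvCatTag c) =
      if (PySem.Str.strip ((PySem.Dict.mk L).getD c "") != "") = true then [c] else [] := by
  induction L with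
  | nil =>
      simp [PySem.Dict.getD_eq_get?_getD, PySem.Dict.get?,
        (by decide : PySem.Str.strip "" = "")]
  | cons kv t ih =>
      obtain ⟨k, v⟩ := kv
      simp only [List.map_cons, List.nodup_cons] at hnd
      obtain ⟨hknot, hndt⟩ := hnd
      rw [List.flatMap_cons, PySem.Dict.getD_eq_get?_getD, PySem.Dict.get?_mk_cons]
      by_cases hk : k = c
      · subst hk
        have htail : t.flatMap (pvCatTag k) = [] := by
          rw [List.flatMap_eq_nil_iff]
          intro kv' hkv'
          have : kv'.1 ≠ k := fun h => hknot (h ▸ List.mem_map_of_mem hkv')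
          simp [pvCatTag, this]
        rw [htail]
        simp [pvCatTag]
      · have hne : (k == c) = false := by simp [beq_iff_eq]; exact hk
        rw [hne]
        simp only [if_false, Bool.false_eq_true]
        have : pvCatTag c (k, v) = [] := by simp [pvCatTag, hne]
        rw [this, List.nil_append]
        rw [ih hndt, PySem.Dict.getD_eq_get?_getD]

lemma pvFilter_four (p : String → Bool) :
    CATEGORY_ORDER.filter p =
      (if p "Theory" then ["Theory"] else []) ++ (if p "Entity" then ["Entity"] else []) ++
      (if p "Example" then ["Example"] else []) ++ (if p "Other" then ["Other"] else []) := by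
  by_cases h0 : p "Theory" = true <;> by_cases h1 : p "Entity" = true <;>
    by_cases h2 : p "Example" = true <;> by_cases h3 : p "Other" = true <;>
      simp [CATEGORY_ORDER, List.filter_cons, h0, h1, h2, h3]

-- ===== VERDICT (by name: the statement is the Claim_ definition above) =====
theorem ordered_doc_keys_py_spec : Claim_equal_ordered_doc_keys_py := by
  intro docs _
  have hnd : (((PySem.Dict.ofList docs).items).map Prod.fst).Nodup := by
    have h := PySem.Dict.nodup_keys_ofList (κ := String) (ν := String) docs
    simpa [PySem.Dict.keys] using h
  unfold Spec_ordered_doc_keys_py ordered_doc_keys_py ordered_doc_keys_py_alt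
  simp only [pvRank_eq]
  rw [show ((CATEGORY_ORDER.length : Int)) = 4 from rfl]
  have hstep1 : (fun (extra : List String) (kv : String × String) =>
        if (PySem.Str.strip kv.1 == "" || CATEGORY_ORDER.contains (PySem.Str.strip kv.1)) then extra
        else if (PySem.Str.strip kv.2 != "") then extra ++ [PySem.Str.strip kv.1] else extra)
      = fun acc kv => acc ++ pvExtraTag kv := by
    funext acc kv
    simp only [pvExtraTag]
    split_ifs <;> simp_all
  have hstep2 : (fun (acc : List (Int × String)) (kv : String × String) =>
        if PySem.Str.strip kv.2 == "" then acc
        else match pvRank.get? kv.1 with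
          | none =>
              if (PySem.Str.strip kv.1 != "" && !(pvRank.contains (PySem.Str.strip kv.1))) then
                acc ++ [((4 : Int), PySem.Str.strip kv.1)]
              else acc
          | some i => acc ++ [(i, kv.1)])
      = fun acc kv => acc ++ pvTag kv := by
    funext acc kv
    simp only [pvTag]
    by_cases hv : (PySem.Str.strip kv.2 == "") = true
    · simp [hv]
    · cases hg : pvRank.get? kv.1 <;> simp only [hv, hg, if_false, Bool.false_eq_true] <;>
        split_ifs <;> simp
  rw [hstep1, hstep2, PySem.List.foldl_append_eq_flatMap (g := pvExtraTag),
    PySem.List.foldl_append_eq_flatMap (g := pvTag)]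
  rw [show PySem.List.pyRange 0 ((4 : Int) + 1) 1 = [0, 1, 2, 3, 4] from by decide]
  simp only [List.foldl_cons, List.foldl_nil, List.nil_append, List.filter_flatMap,
    List.map_flatMap]
  simp only [pvTag_filter0, pvTag_filter1, pvTag_filter2, pvTag_filter3, pvTag_filter4]
  rw [pvFlatMap_catTag _ hnd "Theory", pvFlatMap_catTag _ hnd "Entity",
      pvFlatMap_catTag _ hnd "Example", pvFlatMap_catTag _ hnd "Other", pvMk_items]
  rw [pvFilter_four]
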